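-- pv_equiv track=rewrite | github.com/theElandor/aoc202 | day4/a.py | get_main_diags
-- ===== SOURCE A (Python) =====
-- def ok(i,j,grid):
--     if i >= len(grid) or i < 0 or j < 0 or j >= len(grid[0]):
--         return False
--     return True
--
-- def get_diag(grid, si, sj, delta):
--     i,j = si, sj
--     diag = []
--     while ok(i,j,grid):
--         diag.append(grid[i][j])
--         i += delta
--         j += delta
--     return diag
--
-- def get_main_diags(grid):
--     m = []
--     for i in range(len(grid)):
--         j = 0
--         m.append(get_diag(grid, i, j, 1))
--     for j in range(1,len(grid[0])-1):
--         i = 0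
--         m.append(get_diag(grid, i, j, 1))
--     return m
-- ===== SOURCE B (Python) =====
-- def get_main_diags(grid):
--     w = len(grid[0])
--     bucket = {}
--     for i, row in enumerate(grid):
--         for j in range(w):
--             bucket.setdefault(i - j, []).append(row[j])
--     out = [bucket.get(i, []) for i in range(len(grid))]
--     for j in range(1, w - 1):
--         out.append(bucket[-j])
--     return out
-- ===== Notes on version B (the rewrite author's own statement) =====
-- stated objective: alternative
-- what changed: A extracts each diagonal separately by walking from its border start cell with a per-step bounds-checked while loop; B makes one pass over all cells, grouping them into a dict keyed by i-j (appended in increasing-i order), and then assembles the output by dictionary lookup in A's emission order.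
import Mathlib
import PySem

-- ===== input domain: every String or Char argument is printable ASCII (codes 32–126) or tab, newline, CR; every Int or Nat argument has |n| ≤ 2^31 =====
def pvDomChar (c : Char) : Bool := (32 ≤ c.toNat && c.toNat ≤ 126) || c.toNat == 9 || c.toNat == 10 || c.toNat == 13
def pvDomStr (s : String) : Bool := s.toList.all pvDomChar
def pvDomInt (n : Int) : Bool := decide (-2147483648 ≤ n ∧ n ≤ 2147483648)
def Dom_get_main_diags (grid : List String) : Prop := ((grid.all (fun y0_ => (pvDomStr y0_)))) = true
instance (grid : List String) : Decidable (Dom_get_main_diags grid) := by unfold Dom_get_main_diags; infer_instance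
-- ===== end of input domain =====

-- B replaces A's per-diagonal while-loop walks by one grouping pass over all cells into a
-- dict keyed by i-j, assembled by lookup afterwards; same cost, different algorithm; return value only.

-- ===== PORT A =====
-- row[j] for an Int index: exact for 0 ≤ j < len row; out of range Python raises IndexError,
-- which Pre_get_main_diags excludes.
def pvCellRow (row : String) (j : Int) : String :=
  String.ofList [PySem.List.pyGetD row.toList j ' ']

-- grid[i][j] (A indexes the grid globally)
def pvCell (grid : List String) (i j : Int) : String :=
  pvCellRow (PySem.List.pyGetD grid i "") j

-- ok(i, j, grid); len(grid[0]) raises IndexError on an empty grid (excluded by Pre_),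
-- headD "" is exact on nonempty grids.
def pv_ok (i j : Int) (grid : List String) : Bool :=
  if (grid.length : Int) ≤ i ∨ i < 0 ∨ j < 0 ∨ ((grid.headD "").toList.length : Int) ≤ j
  then false else true

-- the while loop of get_diag; fuel only makes it total (with delta = 1, as called, the walk
-- takes at most (len grid) + (len grid[0]) steps, so the fuel never runs out)
def pv_get_diag_go (grid : List String) (delta : Int) : Nat → Int → Int → List String
  | 0, _, _ => []
  | fuel+1, i, j =>
      if pv_ok i j grid then pvCell grid i j :: pv_get_diag_go grid delta fuel (i+delta) (j+delta)
      else []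

def pv_get_diag (grid : List String) (si sj delta : Int) : List String :=
  pv_get_diag_go grid delta (grid.length + (grid.headD "").toList.length + 1) si sj

def get_main_diags (grid : List String) : List (List String) :=
  let m := (PySem.List.pyRange 0 (grid.length : Int) 1).foldl
             (fun m i => m ++ [pv_get_diag grid i 0 1]) []
  (PySem.List.pyRange 1 (((grid.headD "").toList.length : Int) - 1) 1).foldl
    (fun m j => m ++ [pv_get_diag grid 0 j 1]) m

-- ===== PORT B =====
-- one pass over all cells: bucket[i - j].append(row[j]) (setdefault+append = modify with []),
-- then assemble the output by lookup; bucket[-j] in the second loop always finds its key on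
-- Pre_ inputs, so getD is exact there.
def get_main_diags_alt (grid : List String) : List (List String) :=
  let w : Int := (grid.headD "").toList.length   -- len(grid[0]); raises on [] (outside Pre_)
  let bucket : PySem.Dict Int (List String) :=
    (PySem.List.enumerate grid).foldl
      (fun b p => (PySem.List.pyRange 0 w 1).foldl
        (fun b j => b.modify (p.1 - j) [] (· ++ [pvCellRow p.2 j])) b)
      PySem.Dict.empty
  let out := (PySem.List.pyRange 0 (grid.length : Int) 1).map (fun i => bucket.getD i [])
  out ++ (PySem.List.pyRange 1 (w - 1) 1).map (fun j => bucket.getD (-j) [])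

-- ===== PRECONDITION & SPEC =====
-- Pre_ = exactly the inputs on which Python A returns: a nonempty grid whose every row is at
-- least as long as row 0 (otherwise len(grid[0]) or an indexed cell raises IndexError).
def Pre_get_main_diags (grid : List String) : Prop :=
  grid ≠ [] ∧ ∀ s ∈ grid, (grid.headD "").toList.length ≤ s.toList.length
instance (grid : List String) : Decidable (Pre_get_main_diags grid) := by
  unfold Pre_get_main_diags; infer_instance

def pvWitness_get_main_diags : List String := ["abc", "def", "ghi"]

def Spec_get_main_diags (grid : List String) (out : List (List String)) : Prop := out = get_main_diags_alt grid
instance (grid : List String) (out : List (List String)) : Decidable (Spec_get_main_diags grid out) := by unfold Spec_get_main_diags; infer_instance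

-- ===== CLAIM (what is proved, stated in full; the proofs are below) =====
def Claim_equal_get_main_diags : Prop := ∀ (grid : List String), Dom_get_main_diags grid → Pre_get_main_diags grid → Spec_get_main_diags grid (get_main_diags grid)

-- ===== LEMMAS AND PROOFS =====

-- shifting a total indexed access across a cons (positive index)
theorem pvGetD_cons_pos (x : String) (xs : List String) (k : Int) (h : 1 ≤ k) :
    PySem.List.pyGetD (x::xs) k "" = PySem.List.pyGetD xs (k-1) "" := by
  by_cases hk : k ≤ (xs.length : Int)
  · have e : k.toNat = (k-1).toNat + 1 := by omega
    rw [PySem.List.pyGetD_eq_getElem (x::xs) "" (by omega) (by simp; omega),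
        PySem.List.pyGetD_eq_getElem xs "" (by omega) (by omega)]
    simp only [e, List.getElem_cons_succ]
  · rw [PySem.List.pyGetD_of_none, PySem.List.pyGetD_of_none]
    · simp [PySem.List.pyGet?_eq_none_iff, PySem.Raise.InRange]; omega
    · simp [PySem.List.pyGet?_eq_none_iff, PySem.Raise.InRange]; omega

-- A's closed form: diagonal from (si, sj), length min(n - si, w - sj)
def pvDiagCF (grid : List String) (si sj : Int) : List String :=
  (List.range (min ((grid.length : Int) - si) (((grid.headD "").toList.length : Int) - sj)).toNat).map
    (fun (k : Nat) => pvCell grid (si + (k : Int)) (sj + (k : Int)))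

-- the while-loop walk equals the closed-form diagonal
theorem pv_diag_closed (grid : List String) (si sj : Int) (hsi : 0 ≤ si) (hsj : 0 ≤ sj)
    (fuel : Nat)
    (hf : (min ((grid.length : Int) - si) (((grid.headD "").toList.length : Int) - sj)).toNat ≤ fuel) :
    pv_get_diag_go grid 1 fuel si sj = pvDiagCF grid si sj := by
  induction fuel generalizing si sj with
  | zero =>
      have h0 : (min ((grid.length : Int) - si) (((grid.headD "").toList.length : Int) - sj)).toNat = 0 := by
        omega
      unfold pvDiagCF
      rw [h0]
      simp [pv_get_diag_go]
  | succ fuel ih =>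
      by_cases hb : si < (grid.length : Int) ∧ sj < ((grid.headD "").toList.length : Int)
      · have hok : pv_ok si sj grid = true := by
          unfold pv_ok
          rw [if_neg]
          omega
        have hsplit :
            (min ((grid.length : Int) - si) (((grid.headD "").toList.length : Int) - sj)).toNat =
            (min ((grid.length : Int) - (si + 1)) (((grid.headD "").toList.length : Int) - (sj + 1))).toNat + 1 := by
          omega
        unfold pvDiagCF
        rw [hsplit, List.range_succ_eq_map, List.map_cons, List.map_map]
        simp only [pv_get_diag_go, hok, if_true]
        congr 1
        · simp
        · rw [ih (si + 1) (sj + 1) (by omega) (by omega) (by omega)]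
          unfold pvDiagCF
          apply List.map_congr_left
          intro k _
          simp only [Function.comp_apply]
          congr 1 <;> push_cast <;> ring
      · have hok : pv_ok si sj grid = false := by
          unfold pv_ok
          rw [if_pos]
          omega
        have h0 : (min ((grid.length : Int) - si) (((grid.headD "").toList.length : Int) - sj)).toNat = 0 := by
          omega
        unfold pvDiagCF
        rw [h0]
        simp [pv_get_diag_go, hok]

-- B side: the cells a row (index s) contributes to bucket key d, row by row
def pvDiagRows (w : Int) : List String → Int → Int → List String
  | [], _, _ => []
  | row :: rest, s, d =>
      (if 0 ≤ s - d ∧ s - d < w then [pvCellRow row (s - d)] else []) ++ pvDiagRows w rest (s+1) d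

-- within one row, exactly one column j has key i - j = d (and only if it is in range)
theorem pv_filter_key (w i d : Int) :
    (PySem.List.pyRange 0 w 1).filter (fun j => i - j == d) =
      if 0 ≤ i - d ∧ i - d < w then [i - d] else [] := by
  have hcong : ∀ j ∈ PySem.List.pyRange 0 w 1, (i - j == d) = (j == i - d) := by
    intro j _
    by_cases hj : j = i - d
    · subst hj; simp [show i - (i - d) = d from by ring]
    · have hne : i - j ≠ d := by omega
      simp [hj, hne]
  rw [List.filter_congr hcong, List.filter_beq]
  by_cases hmem : 0 ≤ i - d ∧ i - d < w
  · rw [List.count_eq_one_of_mem (PySem.List.nodup_pyRange_one 0 w)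
        (PySem.List.mem_pyRange_one.mpr ⟨by omega, by omega⟩), if_pos hmem]
    simp
  · rw [List.count_eq_zero.mpr (fun hm => hmem (by
      have := PySem.List.mem_pyRange_one.mp hm; omega)), if_neg hmem]
    simp

-- the inner loop (one row) appends that row's contribution to bucket key d
theorem pv_bucket_row (w : Int) (b : PySem.Dict Int (List String)) (p : Int × String) (d : Int) :
    ((PySem.List.pyRange 0 w 1).foldl
        (fun b j => b.modify (p.1 - j) [] (· ++ [pvCellRow p.2 j])) b).getD d []
      = b.getD d [] ++ (if 0 ≤ p.1 - d ∧ p.1 - d < w then [pvCellRow p.2 (p.1 - d)] else []) := by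
  have key : (PySem.List.pyRange 0 w 1).foldl
        (fun b j => b.modify (p.1 - j) [] (· ++ [pvCellRow p.2 j])) b
      = ((PySem.List.pyRange 0 w 1).map (fun j => (p.1 - j, pvCellRow p.2 j))).foldl
          (fun d (q : Int × String) => d.modify q.1 [] (· ++ [q.2])) b := by
    rw [List.foldl_map]
  rw [key, PySem.Dict.getD_foldl_modify_append, List.filter_map]
  congr 1
  have hcomp : ((fun (q : Int × String) => q.1 == d) ∘ (fun j => (p.1 - j, pvCellRow p.2 j)))
      = fun j => p.1 - j == d := rfl
  rw [hcomp, pv_filter_key]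
  split_ifs with hc <;> simp

-- the whole grouping pass: bucket key d holds exactly the rows' contributions in order
theorem pv_bucket_spec (w : Int) :
    ∀ (rows : List String) (b : PySem.Dict Int (List String)) (s d : Int),
    ((PySem.List.enumerate rows s).foldl
        (fun b p => (PySem.List.pyRange 0 w 1).foldl
          (fun b j => b.modify (p.1 - j) [] (· ++ [pvCellRow p.2 j])) b) b).getD d []
      = b.getD d [] ++ pvDiagRows w rows s d
  | [], b, s, d => by simp [PySem.List.enumerate_nil, pvDiagRows]
  | row :: rest, b, s, d => by
      rw [PySem.List.enumerate_cons, List.foldl_cons,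
          pv_bucket_spec w rest _ (s+1) d]
      rw [pv_bucket_row w b (s, row) d]
      simp [pvDiagRows, List.append_assoc]

-- the row-by-row contributions to key d form a contiguous diagonal segment
theorem pvDiagRows_closed (w : Int) (rows : List String) (s d : Int) :
    pvDiagRows w rows s d =
      (PySem.List.pyRange (max s d) (min (s + (rows.length : Int)) (d + w)) 1).map
        (fun i => pvCellRow (PySem.List.pyGetD rows (i - s) "") (i - d)) := by
  induction rows generalizing s with
  | nil =>
      rw [pvDiagRows, PySem.List.pyRange_one_eq_nil (by simp)]
      simp
  | cons row rest ih =>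
      rw [pvDiagRows, ih (s+1)]
      by_cases hc : 0 ≤ s - d ∧ s - d < w
      · have hmax : max s d = s := by omega
        have hmax2 : max (s+1) d = s + 1 := by omega
        have hmin : min ((s+1) + (rest.length : Int)) (d + w)
            = min (s + ((row :: rest).length : Int)) (d + w) := by simp; omega
        rw [if_pos hc, hmax2, hmin, hmax]
        conv_rhs => rw [PySem.List.pyRange_one_cons (by simp; omega)]
        rw [List.map_cons, List.singleton_append]
        congr 1
        · rw [show s - s = (0:Int) from by ring, PySem.List.pyGetD_zero_cons]
        · apply List.map_congr_left
          intro i hi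
          have hmem := PySem.List.mem_pyRange_one.mp hi
          rw [pvGetD_cons_pos row rest (i - s) (by omega),
              show i - (s+1) = i - s - 1 from by ring]
      · rw [if_neg hc]
        by_cases hs : s < d
        · have hmax : max s d = d := by omega
          have hmax2 : max (s+1) d = d := by omega
          have hmin : min ((s+1) + (rest.length : Int)) (d + w)
              = min (s + ((row :: rest).length : Int)) (d + w) := by simp; omega
          rw [hmax2, hmin, hmax, List.nil_append]
          apply List.map_congr_left
          intro i hi
          have hmem := PySem.List.mem_pyRange_one.mp hi
          rw [pvGetD_cons_pos row rest (i - s) (by omega),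
              show i - (s+1) = i - s - 1 from by ring]
        · -- s ≥ d + w : both sides empty
          rw [PySem.List.pyRange_one_eq_nil (by simp; omega),
              PySem.List.pyRange_one_eq_nil (by simp; omega)]
          simp

-- a border-started diagonal: bucket key si - sj equals A's closed form
theorem pv_slot_eq (grid : List String) (si sj : Int)
    (h0 : 0 ≤ si) (h1 : 0 ≤ sj) (hm : min si sj = 0) :
    pvDiagRows ((grid.headD "").toList.length : Int) grid 0 (si - sj) = pvDiagCF grid si sj := by
  rw [pvDiagRows_closed]
  have hmax : max (0:Int) (si - sj) = si := by omega
  rw [hmax, PySem.List.pyRange_one, List.map_map]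
  unfold pvDiagCF
  have hN : ((min ((0:Int) + (grid.length : Int)) (si - sj + ((grid.headD "").toList.length : Int))) - si).toNat
      = (min ((grid.length : Int) - si) (((grid.headD "").toList.length : Int) - sj)).toNat := by omega
  rw [hN]
  apply List.map_congr_left
  intro k _
  simp only [Function.comp_apply]
  unfold pvCell
  rw [show (si + (k:Int)) - 0 = si + (k:Int) from by ring,
      show (si + (k:Int)) - (si - sj) = sj + (k:Int) from by ring]

-- ===== VERDICT (by name: the statement is the Claim_ definition above) =====
theorem get_main_diags_spec : Claim_equal_get_main_diags := by
  intro grid _ _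
  unfold Spec_get_main_diags get_main_diags get_main_diags_alt
  rw [PySem.List.foldl_append_singleton_eq_map, PySem.List.foldl_append_singleton_eq_map]
  simp only [List.nil_append]
  congr 1
  · apply List.map_congr_left
    intro i hi
    have hmem := PySem.List.mem_pyRange_one.mp hi
    rw [show pv_get_diag grid i 0 1 = pvDiagCF grid i 0 from
          pv_diag_closed grid i 0 (by omega) le_rfl _ (by omega)]
    rw [pv_bucket_spec _ grid PySem.Dict.empty 0 i, PySem.Dict.getD_empty, List.nil_append]
    have h := pv_slot_eq grid i 0 (by omega) le_rfl (by omega)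
    rw [show i - (0:Int) = i from by ring] at h
    exact h.symm
  · apply List.map_congr_left
    intro j hj
    have hmem := PySem.List.mem_pyRange_one.mp hj
    rw [show pv_get_diag grid 0 j 1 = pvDiagCF grid 0 j from
          pv_diag_closed grid 0 j le_rfl (by omega) _ (by omega)]
    rw [pv_bucket_spec _ grid PySem.Dict.empty 0 (-j), PySem.Dict.getD_empty, List.nil_append]
    have h := pv_slot_eq grid 0 j le_rfl (by omega) (by omega)
    rw [show (0:Int) - j = -j from by ring] at h
    exact h.symm
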